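-- pv_equiv track=rewrite | github.com/s1366560/agi-demos | src/infrastructure/adapters/primary/web/routers/mcp/apps.py | _extract_server_name_from_uri
-- ===== SOURCE A (Python) =====
-- from typing import Any, List, Optional
--
-- def _extract_server_name_from_uri(uri: str) -> Optional[str]:
--     """Extract server name from MCP app resource URI.
--
--     Supported URI schemes:
--     - ui://server-name/path -> server-name
--     - app://server-name/path -> server-name
--     - mcp-app://server-name/path -> server-name
--
--     Examples:
--     - ui://pick-color/mcp-app.html -> pick-color
--     - app://color-picker -> color-picker
--     - mcp-app://my-server/index.html -> my-server
--     """
--     # List of supported URI scheme prefixes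
--     prefixes = ["ui://", "app://", "mcp-app://"]
--
--     for prefix in prefixes:
--         if uri.startswith(prefix):
--             # Remove prefix
--             rest = uri[len(prefix) :]
--             # Extract first path segment as server name
--             if "/" in rest:
--                 return rest.split("/")[0]
--             return rest if rest else None
--
--     return None
-- ===== SOURCE B (Python) =====
-- def _extract_server_name_from_uri(uri):
--     """Extract server name from MCP app resource URI.
--
--     Single-pass character scanner: accumulate scheme characters until the
--     literal '://' is reached, require the scheme to be one of the supported
--     ones, then accumulate the server name up to the first '/' (or the end).
--     """
--     n = len(uri)
--     i = 0
--     scheme = []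
--     while uri[i:i + 3] != "://":
--         if i >= n:
--             return None
--         scheme.append(uri[i])
--         i += 1
--     if ''.join(scheme) not in ("ui", "app", "mcp-app"):
--         return None
--     i += 3
--     name = []
--     while i < n:
--         ch = uri[i]
--         if ch == '/':
--             return ''.join(name)
--         name.append(ch)
--         i += 1
--     return ''.join(name) if name else None
-- ===== Notes on version B (the rewrite author's own statement) =====
-- stated objective: alternative
-- what changed: Replaces A's prefix-trial loop (startswith per prefix, slice, 'in'+split) with a single-pass character-level scanner: accumulate the scheme until the literal '://', test it against the supported set, then accumulate the name up to the first '/'.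
import Mathlib
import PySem

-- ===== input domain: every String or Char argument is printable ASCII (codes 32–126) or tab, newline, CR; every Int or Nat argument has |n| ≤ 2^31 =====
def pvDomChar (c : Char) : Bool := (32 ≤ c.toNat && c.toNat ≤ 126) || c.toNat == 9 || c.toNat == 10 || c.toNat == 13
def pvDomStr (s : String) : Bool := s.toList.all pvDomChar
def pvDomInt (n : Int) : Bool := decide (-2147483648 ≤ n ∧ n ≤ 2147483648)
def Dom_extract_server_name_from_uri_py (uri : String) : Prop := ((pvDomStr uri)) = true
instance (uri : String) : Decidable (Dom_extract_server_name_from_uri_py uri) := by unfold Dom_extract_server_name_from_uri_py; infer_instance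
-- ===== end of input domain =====

-- B replaces A's prefix-trial loop by a single-pass character scanner (scheme accumulator, then name accumulator); objective: alternative.


-- ===== PORT A =====
-- body of A's 'if uri.startswith(prefix)' branch: split off the first path segment
-- (rest.split("/") is never empty, so the pyGet? at index 0 never yields none)
def extractA_handle (rest : String) : Option String :=
  if PySem.Str.isIn "/" rest then
    PySem.List.pyGet? ((PySem.Chars.splitOn rest.toList "/".toList).map String.ofList) 0
  else if rest ≠ "" then some rest else none

-- A's 'for prefix in prefixes' loop with early return
def extractA_loop (uri : String) : List String → Option String
  | [] => none
  | p :: ps =>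
    if PySem.Str.startswith uri p then
      extractA_handle (PySem.Str.slice uri (some (PySem.Str.len p)) none)
    else extractA_loop uri ps

def extract_server_name_from_uri_py (uri : String) : Option String :=
  extractA_loop uri ["ui://", "app://", "mcp-app://"]

-- ===== PORT B =====
-- B's second while loop: accumulate the server name up to the first '/' (or the end);
-- the Python index i is represented by the not-yet-consumed suffix of the char list
def scanName : List Char → List Char → Option String
  | [], name => if name ≠ [] then some (String.ofList name) else none
  | c :: t, name => if c = '/' then some (String.ofList name) else scanName t (name ++ [c])

-- B's first while loop: accumulate the scheme until the literal '://' is reached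
-- (cs.take 3 = uri[i:i+3]); then the membership test and the name scan
def scanScheme (cs acc : List Char) : Option String :=
  if cs.take 3 = [':', '/', '/'] then
    (if (String.ofList acc) ∈ (["ui", "app", "mcp-app"] : List String) then
      scanName (cs.drop 3) [] else none)
  else
    match cs with
    | [] => none
    | c :: t => scanScheme t (acc ++ [c])
termination_by cs.length
decreasing_by simp

def extract_server_name_from_uri_py_alt (uri : String) : Option String :=
  scanScheme uri.toList []

-- ===== PRECONDITION & SPEC =====
def Spec_extract_server_name_from_uri_py (uri : String) (out : Option String) : Prop := out = extract_server_name_from_uri_py_alt uri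
instance (uri : String) (out : Option String) : Decidable (Spec_extract_server_name_from_uri_py uri out) := by unfold Spec_extract_server_name_from_uri_py; infer_instance

-- ===== CLAIM (what is proved, stated in full; the proofs are below) =====
def Claim_equal_extract_server_name_from_uri_py : Prop := ∀ (uri : String), Dom_extract_server_name_from_uri_py uri → Spec_extract_server_name_from_uri_py uri (extract_server_name_from_uri_py uri)

-- ===== LEMMAS AND PROOFS =====

-- proof-only helper: split a char list at the FIRST occurrence of sep (none = absent);
-- both ports are characterised against it
def partChars (sep : List Char) : List Char → Option (List Char × List Char)
  | [] => none
  | c :: t =>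
    if sep.isPrefixOf (c :: t) then some ([], (c :: t).drop sep.length)
    else
      match partChars sep t with
      | some (a, b) => some (c :: a, b)
      | none => none

lemma part_some_append (sep : List Char) :
    ∀ l a b, partChars sep l = some (a, b) → l = a ++ sep ++ b := by
  intro l
  induction l with
  | nil => intro a b h; simp [partChars] at h
  | cons c t ih =>
      intro a b h
      by_cases hpre : sep.isPrefixOf (c :: t)
      · rw [partChars, if_pos hpre] at h
        obtain ⟨u, hu⟩ := (List.isPrefixOf_iff_prefix.mp hpre)
        cases h
        simp [← hu]
      · rw [partChars, if_neg hpre] at h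
        rcases hr : partChars sep t with _ | ⟨a', b'⟩ <;> rw [hr] at h <;> simp at h
        obtain ⟨rfl, rfl⟩ := h
        simp [ih _ _ hr]

lemma part_ui (r : List Char) :
    partChars [':', '/', '/'] (['u', 'i', ':', '/', '/'] ++ r) = some (['u', 'i'], r) := by
  simp [partChars, List.isPrefixOf]

lemma part_app (r : List Char) :
    partChars [':', '/', '/'] (['a', 'p', 'p', ':', '/', '/'] ++ r) = some (['a', 'p', 'p'], r) := by
  simp [partChars, List.isPrefixOf]

lemma part_mcp (r : List Char) :
    partChars [':', '/', '/'] (['m', 'c', 'p', '-', 'a', 'p', 'p', ':', '/', '/'] ++ r) =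
      some (['m', 'c', 'p', '-', 'a', 'p', 'p'], r) := by
  simp [partChars, List.isPrefixOf]

lemma take3_iff (cs : List Char) :
    cs.take 3 = [':', '/', '/'] ↔ [':', '/', '/'].isPrefixOf cs := by
  rw [List.isPrefixOf_iff_prefix, List.prefix_iff_eq_take]
  constructor <;> (intro h; exact h.symm)

-- characterisation of B's scheme loop by the first occurrence of '://'
lemma scanScheme_part : ∀ cs acc, scanScheme cs acc =
    match partChars [':', '/', '/'] cs with
    | some (a, b) =>
        if String.ofList (acc ++ a) ∈ (["ui", "app", "mcp-app"] : List String)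
        then scanName b [] else none
    | none => none := by
  intro cs
  induction cs with
  | nil => intro acc; rw [scanScheme]; simp [partChars]
  | cons c t ih =>
      intro acc
      by_cases hpre : [':', '/', '/'].isPrefixOf (c :: t)
      · rw [scanScheme, if_pos ((take3_iff _).mpr hpre), partChars, if_pos hpre]
        simp
      · rw [scanScheme, if_neg (fun h => hpre ((take3_iff _).mp h)), partChars, if_neg hpre,
          ih (acc ++ [c])]
        rcases hr : partChars [':', '/', '/'] t with _ | ⟨a', b'⟩ <;> simp

-- characterisations of B's name loop
lemma scanName_mem : ∀ b : List Char, '/' ∈ b → ∀ acc,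
    scanName b acc = some (String.ofList (acc ++ b.takeWhile (· != '/'))) := by
  intro b
  induction b with
  | nil => intro h; simp at h
  | cons c t ih =>
      intro h acc
      by_cases hc : c = '/'
      · subst hc; simp [scanName]
      · have ht : '/' ∈ t := by
          rcases List.mem_cons.mp h with h1 | h1
          · exact (hc h1.symm).elim
          · exact h1
        rw [scanName, if_neg hc, ih ht]
        simp [hc]

lemma scanName_nomem : ∀ b : List Char, '/' ∉ b → ∀ acc,
    scanName b acc = if acc ++ b ≠ [] then some (String.ofList (acc ++ b)) else none := by
  intro b
  induction b with
  | nil => intro _ acc; simp [scanName]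
  | cons c t ih =>
      intro h acc
      simp only [List.mem_cons, not_or] at h
      rw [scanName, if_neg (fun hc => h.1 hc.symm), ih h.2]
      simp

-- ----- machinery relating A's split("/")[0] to takeWhile -----
lemma go_acc (sep : List Char) :
    ∀ fuel l cur acc, PySem.Chars.splitOn.go sep fuel l cur acc =
      acc.reverse ++ PySem.Chars.splitOn.go sep fuel l cur [] := by
  intro fuel
  induction fuel with
  | zero => intro l cur acc; rw [PySem.Chars.splitOn.go.eq_1, PySem.Chars.splitOn.go.eq_1]; simp
  | succ fuel ih =>
      intro l cur acc
      cases l with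
      | nil =>
          rw [PySem.Chars.splitOn.go.eq_2 _ _ _ _ (by simp),
            PySem.Chars.splitOn.go.eq_2 _ _ _ _ (by simp)]
          simp
      | cons c rest =>
          rw [PySem.Chars.splitOn.go.eq_3, PySem.Chars.splitOn.go.eq_3]
          by_cases hpre : sep.isPrefixOf (c :: rest) = true
          · rw [if_pos hpre, if_pos hpre, ih _ _ (cur.reverse :: acc), ih _ _ [cur.reverse]]
            simp
          · rw [if_neg hpre, if_neg hpre, ih _ _ acc]

lemma go_head :
    ∀ fuel (l cur : List Char), l.length < fuel →
      ∃ t, PySem.Chars.splitOn.go ['/'] fuel l cur [] =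
        (cur.reverse ++ l.takeWhile (· != '/')) :: t := by
  intro fuel
  induction fuel with
  | zero => intro l cur h; omega
  | succ fuel ih =>
      intro l cur h
      cases l with
      | nil =>
          refine ⟨[], ?_⟩
          rw [PySem.Chars.splitOn.go.eq_2 _ _ _ _ (by simp)]
          simp
      | cons c rest =>
          rw [PySem.Chars.splitOn.go.eq_3]
          by_cases hc : c = '/'
          · subst hc
            rw [if_pos (by simp [List.isPrefixOf])]
            refine ⟨PySem.Chars.splitOn.go ['/'] fuel rest [] [], ?_⟩
            rw [go_acc]
            simp
          · rw [if_neg (by simp [List.isPrefixOf]; exact fun h => hc h.symm)]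
            obtain ⟨t, ht⟩ := ih rest (c :: cur) (by simp at h ⊢; omega)
            refine ⟨t, ?_⟩
            rw [ht]
            simp [hc]

lemma splitOn_head (b : List Char) :
    ∃ t, PySem.Chars.splitOn b ['/'] = b.takeWhile (· != '/') :: t := by
  obtain ⟨t, ht⟩ := go_head (b.length + 1) b [] (by omega)
  exact ⟨t, by simpa [PySem.Chars.splitOn] using ht⟩

lemma isIn_slash (b : List Char) : PySem.Chars.isIn ['/'] b = true ↔ '/' ∈ b := by
  rw [PySem.Chars.isIn, bne_iff_ne, ne_eq, PySem.Chars.find_eq_neg_one_iff]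
  simp [List.singleton_infix_iff]

-- A's branch body equals B's name loop
lemma tail_eq (b : List Char) :
    extractA_handle (String.ofList b) = scanName b [] := by
  by_cases hb : '/' ∈ b
  · obtain ⟨t, hs⟩ := splitOn_head b
    rw [extractA_handle, if_pos (by
      rw [PySem.Str.isIn]
      show PySem.Chars.isIn ['/'] (String.ofList b).toList = true
      simp only [String.toList_ofList]
      exact (isIn_slash _).mpr hb)]
    rw [scanName_mem b hb []]
    have : (String.ofList b).toList = b := by simp
    rw [show ("/" : String).toList = ['/'] from rfl]
    rw [this, hs]
    simp [PySem.List.pyGet?, PySem.List.pyIdx?]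
  · rw [extractA_handle, if_neg (by
      rw [PySem.Str.isIn]
      show ¬ PySem.Chars.isIn ['/'] (String.ofList b).toList = true
      simp [isIn_slash, hb]),
      scanName_nomem b hb []]
    by_cases hr : b = []
    · simp [hr]
    · have hne : String.ofList b ≠ "" := fun h => hr (by simpa using congrArg String.toList h)
      simp [hr, hne]

lemma startswith_part (uri : String) (p : String) (scheme : List Char)
    (h : PySem.Str.startswith uri p = true)
    (hpart : ∀ r', partChars [':', '/', '/'] (p.toList ++ r') = some (scheme, r')) :
    ∃ r', partChars [':', '/', '/'] uri.toList = some (scheme, r') := by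
  rw [PySem.Str.startswith_eq, PySem.Chars.startswith, List.isPrefixOf_iff_prefix] at h
  obtain ⟨r', hr⟩ := h
  exact ⟨r', by rw [← hr, hpart]⟩

lemma slice_five (uri : String) (pre b : List Char) (hl : uri.toList = pre ++ b)
    (n : Int) (hpre : pre.length = n.toNat) (h0 : 0 ≤ n) :
    PySem.Str.slice uri (some n) none = String.ofList b := by
  apply String.toList_inj.mp
  rw [PySem.Str.toList_slice, PySem.Chars.slice_eq_listSlice, PySem.List.slice_from _ h0, hl]
  simp [← hpre]

-- ===== VERDICT (by name: the statement is the Claim_ definition above) =====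
theorem extract_server_name_from_uri_py_spec : Claim_equal_extract_server_name_from_uri_py := by
  intro uri _hdom
  show extract_server_name_from_uri_py uri = extract_server_name_from_uri_py_alt uri
  rw [extract_server_name_from_uri_py_alt, scanScheme_part uri.toList []]
  rcases hp : partChars [':', '/', '/'] uri.toList with _ | ⟨a, b⟩
  · -- no '://' in uri: both sides are none
    have hsw : ∀ p scheme, (∀ r', partChars [':', '/', '/'] (p.toList ++ r') = some (scheme, r')) →
        PySem.Str.startswith uri p = false := by
      intro p scheme hpart
      by_contra h
      obtain ⟨r', hr⟩ := startswith_part uri p scheme (by revert h; cases PySem.Str.startswith uri p <;> simp) hpart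
      rw [hp] at hr
      simp at hr
    rw [extract_server_name_from_uri_py, extractA_loop,
      if_neg (by rw [hsw "ui://" ['u', 'i'] part_ui]; simp), extractA_loop,
      if_neg (by rw [hsw "app://" ['a', 'p', 'p'] part_app]; simp), extractA_loop,
      if_neg (by rw [hsw "mcp-app://" ['m', 'c', 'p', '-', 'a', 'p', 'p'] part_mcp]; simp),
      extractA_loop]
  · have hl : uri.toList = a ++ [':', '/', '/'] ++ b := part_some_append _ _ _ _ hp
    by_cases ha1 : a = ['u', 'i']
    · subst ha1
      rw [extract_server_name_from_uri_py, extractA_loop,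
        if_pos (by rw [PySem.Str.startswith_eq, PySem.Chars.startswith, hl]; simp [List.isPrefixOf]),
        show PySem.Str.len "ui://" = 5 from rfl,
        slice_five uri ['u', 'i', ':', '/', '/'] b (by simpa using hl) 5 (by simp) (by norm_num),
        tail_eq b]
      simp
    · by_cases ha2 : a = ['a', 'p', 'p']
      · subst ha2
        rw [extract_server_name_from_uri_py, extractA_loop,
          if_neg (by rw [PySem.Str.startswith_eq, PySem.Chars.startswith, hl]; simp [List.isPrefixOf]),
          extractA_loop,
          if_pos (by rw [PySem.Str.startswith_eq, PySem.Chars.startswith, hl]; simp [List.isPrefixOf]),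
          show PySem.Str.len "app://" = 6 from rfl,
          slice_five uri ['a', 'p', 'p', ':', '/', '/'] b (by simpa using hl) 6 (by simp) (by norm_num),
          tail_eq b]
        simp
      · by_cases ha3 : a = ['m', 'c', 'p', '-', 'a', 'p', 'p']
        · subst ha3
          rw [extract_server_name_from_uri_py, extractA_loop,
            if_neg (by rw [PySem.Str.startswith_eq, PySem.Chars.startswith, hl]; simp [List.isPrefixOf]),
            extractA_loop,
            if_neg (by rw [PySem.Str.startswith_eq, PySem.Chars.startswith, hl]; simp [List.isPrefixOf]),
            extractA_loop,
            if_pos (by rw [PySem.Str.startswith_eq, PySem.Chars.startswith, hl]; simp [List.isPrefixOf]),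
            show PySem.Str.len "mcp-app://" = 10 from rfl,
            slice_five uri ['m', 'c', 'p', '-', 'a', 'p', 'p', ':', '/', '/'] b (by simpa using hl) 10 (by simp) (by norm_num),
            tail_eq b]
          simp
        · -- scheme not supported: both sides are none
          have hsw : ∀ p scheme, (∀ r', partChars [':', '/', '/'] (p.toList ++ r') = some (scheme, r')) →
              a ≠ scheme → PySem.Str.startswith uri p = false := by
            intro p scheme hpart hne
            by_contra h
            obtain ⟨r', hr⟩ := startswith_part uri p scheme (by revert h; cases PySem.Str.startswith uri p <;> simp) hpart
            rw [hp] at hr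
            injection hr with h'
            exact hne (Prod.ext_iff.mp h').1
          have e1 : String.ofList a ≠ "ui" := fun h => ha1 (by simpa using congrArg String.toList h)
          have e2 : String.ofList a ≠ "app" := fun h => ha2 (by simpa using congrArg String.toList h)
          have e3 : String.ofList a ≠ "mcp-app" := fun h => ha3 (by simpa using congrArg String.toList h)
          rw [extract_server_name_from_uri_py, extractA_loop,
            if_neg (by rw [hsw "ui://" ['u', 'i'] part_ui ha1]; simp), extractA_loop,
            if_neg (by rw [hsw "app://" ['a', 'p', 'p'] part_app ha2]; simp), extractA_loop,
            if_neg (by rw [hsw "mcp-app://" ['m', 'c', 'p', '-', 'a', 'p', 'p'] part_mcp ha3]; simp),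
            extractA_loop]
          simp [e1, e2, e3]
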